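-- pv_equiv track=rewrite | github.com/dsgoficial/DsgTools | DsgTools/core/DSGToolsProcessingAlgs/Algs/GeneralizationAlgs/reclassifyGroupsOfPixelsToNearestNeighborAlgorithmV4.py | makeBidirectional
-- ===== SOURCE A (Python) =====
-- from typing import Any, Dict, List, Tuple
--
-- def makeBidirectional(restrictions: Dict) -> Dict:
--     """
--     Ensure restrictions are bidirectional.
--
--     Input: {5: [6], 10: [11]}
--     Output: {5: [6], 6: [5], 10: [11], 11: [10]}
--     """
--     result = {}
--
--     # First pass: ensure all keys and values are integers
--     for source, targets in restrictions.items():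
--         source_int = int(source)
--         targets_list = [int(t) for t in targets] if isinstance(targets, list) else [int(targets)]
--         result[source_int] = targets_list
--
--     # Second pass: add reverse mappings
--     reverse_mappings = {}
--     for source, targets in result.items():
--         for target in targets:
--             if target not in reverse_mappings:
--                 reverse_mappings[target] = []
--             if source not in reverse_mappings[target]:
--                 reverse_mappings[target].append(source)
--
--     # Merge reverse mappings
--     for target, sources in reverse_mappings.items():
--         if target in result:
--             # Add any missing sources
--             for source in sources:
--                 if source not in result[target]:
--                     result[target].append(source)
--         else:
--             result[target] = sources
--
--     return result
-- ===== SOURCE B (Python) =====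
-- def makeBidirectional(restrictions):
--     """
--     Ensure restrictions are bidirectional (single in-place scan over a snapshot).
--     """
--     result = {}
--     for source, targets in restrictions.items():
--         source_int = int(source)
--         targets_list = [int(t) for t in targets] if isinstance(targets, list) else [int(targets)]
--         result[source_int] = targets_list
--
--     for source, targets in list(result.items()):
--         for target in targets:
--             if target not in result:
--                 result[target] = [source]
--             elif source not in result[target]:
--                 result[target].append(source)
--
--     return result
-- ===== Notes on version B (the rewrite author's own statement) =====
-- stated objective: simpler
-- what changed: B drops A's separate reverse_mappings index and its merge loop: after the same normalization pass it does a single in-place scan over a snapshot of the normalized items, inserting/appending each reverse edge directly into result, reproducing A's key-insertion and append order.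
import Mathlib
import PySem

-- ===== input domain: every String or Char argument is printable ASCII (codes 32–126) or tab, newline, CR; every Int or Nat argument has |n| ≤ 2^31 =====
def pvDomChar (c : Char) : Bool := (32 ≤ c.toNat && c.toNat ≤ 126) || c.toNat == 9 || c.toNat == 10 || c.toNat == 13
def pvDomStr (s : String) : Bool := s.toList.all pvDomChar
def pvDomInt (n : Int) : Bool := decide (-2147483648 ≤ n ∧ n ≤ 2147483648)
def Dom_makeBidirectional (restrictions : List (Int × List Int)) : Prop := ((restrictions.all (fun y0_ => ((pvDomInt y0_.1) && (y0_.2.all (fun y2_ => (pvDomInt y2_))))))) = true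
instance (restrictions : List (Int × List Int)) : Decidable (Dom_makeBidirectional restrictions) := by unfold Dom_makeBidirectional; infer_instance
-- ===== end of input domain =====

-- B replaces A's build-reverse-index-then-merge (two extra dict passes) by ONE in-place scan
-- over a snapshot of the normalized items; same return value, simpler decomposition.

-- ===== PORT A =====
-- shared first pass of both Pythons: result[int(source)] = [int(t) for t in targets]
def pass1 (restrictions : List (Int × List Int)) : PySem.Dict Int (List Int) :=
  restrictions.foldl (fun d p => d.insert p.1 (p.2.map (fun t => t))) PySem.Dict.empty

-- inner body of A's second pass: one target t for source s
def rmInner (s : Int) (rm : PySem.Dict Int (List Int)) (t : Int) : PySem.Dict Int (List Int) :=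
  let rm1 := if rm.contains t then rm else rm.insert t []
  if s ∈ rm1.getD t [] then rm1 else rm1.modify t [] (· ++ [s])

-- one (source, targets) item of A's second pass
def rmStep (rm : PySem.Dict Int (List Int)) (p : Int × List Int) : PySem.Dict Int (List Int) :=
  p.2.foldl (rmInner p.1) rm

-- inner body of A's merge pass: add source s to result[t] if missing
def mergeInner (t : Int) (res : PySem.Dict Int (List Int)) (s : Int) : PySem.Dict Int (List Int) :=
  if s ∈ res.getD t [] then res else res.modify t [] (· ++ [s])

-- one (target, sources) item of A's merge pass
def mergeStep (res : PySem.Dict Int (List Int)) (q : Int × List Int) : PySem.Dict Int (List Int) :=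
  if res.contains q.1 then q.2.foldl (mergeInner q.1) res else res.insert q.1 q.2

def makeBidirectional (restrictions : List (Int × List Int)) : List (Int × List Int) :=
  let result := pass1 restrictions
  let reverse_mappings := result.items.foldl rmStep PySem.Dict.empty
  (reverse_mappings.items.foldl mergeStep result).items

-- ===== PORT B =====
-- inner body of B's single pass: target t of source s, applied to result directly
def bInner (s : Int) (res : PySem.Dict Int (List Int)) (t : Int) : PySem.Dict Int (List Int) :=
  if ¬ res.contains t then res.insert t [s]
  else if s ∈ res.getD t [] then res
  else res.modify t [] (· ++ [s])

-- one (source, targets) item of B's single pass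
def bStep (res : PySem.Dict Int (List Int)) (p : Int × List Int) : PySem.Dict Int (List Int) :=
  p.2.foldl (bInner p.1) res

def makeBidirectional_alt (restrictions : List (Int × List Int)) : List (Int × List Int) :=
  let result := pass1 restrictions
  (result.items.foldl bStep result).items

-- ===== PRECONDITION & SPEC =====
def Spec_makeBidirectional (restrictions : List (Int × List Int)) (out : List (Int × List Int)) : Prop := out = makeBidirectional_alt restrictions
instance (restrictions : List (Int × List Int)) (out : List (Int × List Int)) : Decidable (Spec_makeBidirectional restrictions out) := by unfold Spec_makeBidirectional; infer_instance

-- ===== CLAIM (what is proved, stated in full; the proofs are below) =====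
def Claim_equal_makeBidirectional : Prop := ∀ (restrictions : List (Int × List Int)), Dom_makeBidirectional restrictions → Spec_makeBidirectional restrictions (makeBidirectional restrictions)

-- ===== LEMMAS AND PROOFS =====

-- mergeStep r (t, [s]) is exactly bInner s r t
theorem mergeStep_singleton (r : PySem.Dict Int (List Int)) (t s : Int) :
    mergeStep r (t, [s]) = bInner s r t := by
  simp only [mergeStep, bInner, List.foldl, mergeInner]
  by_cases h : r.contains t = true <;> simp [h]

theorem contains_mergeInner_mono (k : Int) (r : PySem.Dict Int (List Int)) (x t : Int)
    (h : r.contains t = true) : (mergeInner k r x).contains t = true := by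
  unfold mergeInner PySem.Dict.modify
  split_ifs with h1
  · exact h
  · simp [PySem.Dict.contains_insert, h]

theorem contains_foldl_mergeInner_mono (k : Int) (xs : List Int) (t : Int) :
    ∀ (r : PySem.Dict Int (List Int)), r.contains t = true →
      (xs.foldl (mergeInner k) r).contains t = true := by
  induction xs with
  | nil => intro r h; exact h
  | cons x xs ih => intro r h; exact ih _ (contains_mergeInner_mono k r x t h)

theorem contains_mergeStep_mono (r : PySem.Dict Int (List Int)) (q : Int × List Int) (t : Int)
    (h : r.contains t = true) : (mergeStep r q).contains t = true := by
  unfold mergeStep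
  split_ifs with h1
  · exact contains_foldl_mergeInner_mono q.1 q.2 t r h
  · simp [PySem.Dict.contains_insert, h]

theorem getD_mergeInner_other (k : Int) (r : PySem.Dict Int (List Int)) (x t : Int)
    (hne : t ≠ k) : (mergeInner k r x).getD t [] = r.getD t [] := by
  unfold mergeInner PySem.Dict.modify
  split_ifs with h1
  · rfl
  · exact PySem.Dict.getD_insert_of_ne _ _ _ hne

theorem getD_foldl_mergeInner_other (k : Int) (xs : List Int) (t : Int) (hne : t ≠ k) :
    ∀ (r : PySem.Dict Int (List Int)), (xs.foldl (mergeInner k) r).getD t [] = r.getD t [] := by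
  induction xs with
  | nil => intro r; rfl
  | cons x xs ih => intro r; rw [List.foldl_cons, ih, getD_mergeInner_other k r x t hne]

theorem getD_mergeStep_other (r : PySem.Dict Int (List Int)) (q : Int × List Int) (t : Int)
    (hne : t ≠ q.1) : (mergeStep r q).getD t [] = r.getD t [] := by
  unfold mergeStep
  split_ifs with h1
  · exact getD_foldl_mergeInner_other q.1 q.2 t hne r
  · exact PySem.Dict.getD_insert_of_ne _ _ _ hne

theorem contains_mergeInner_other (k : Int) (r : PySem.Dict Int (List Int)) (x t : Int)
    (hne : t ≠ k) : (mergeInner k r x).contains t = r.contains t := by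
  unfold mergeInner PySem.Dict.modify
  split_ifs with h1
  · rfl
  · simp [PySem.Dict.contains_insert, hne]

-- membership in result[t] is monotone through the merge-inner loop at t
theorem mem_getD_mergeInner_mono (t : Int) (r : PySem.Dict Int (List Int)) (x s : Int)
    (h : s ∈ r.getD t []) : s ∈ (mergeInner t r x).getD t [] := by
  unfold mergeInner
  split_ifs with h1
  · exact h
  · rw [PySem.Dict.getD_modify_self]; exact List.mem_append_left _ h

theorem mem_getD_foldl_mergeInner_mono (t : Int) (xs : List Int) (s : Int) :
    ∀ (r : PySem.Dict Int (List Int)), s ∈ r.getD t [] →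
      s ∈ (xs.foldl (mergeInner t) r).getD t [] := by
  induction xs with
  | nil => intro r h; exact h
  | cons x xs ih => intro r h; exact ih _ (mem_getD_mergeInner_mono t r x s h)

theorem mem_getD_foldl_mergeInner_of_mem (t : Int) (xs : List Int) (s : Int) (hs : s ∈ xs) :
    ∀ (r : PySem.Dict Int (List Int)), s ∈ (xs.foldl (mergeInner t) r).getD t [] := by
  induction xs with
  | nil => cases hs
  | cons x xs ih =>
      intro r
      rcases List.mem_cons.mp hs with h | h
      · subst h
        rw [List.foldl_cons]
        apply mem_getD_foldl_mergeInner_mono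
        unfold mergeInner
        split_ifs with h1
        · exact h1
        · rw [PySem.Dict.getD_modify_self]; exact List.mem_append_right _ (List.mem_singleton.mpr rfl)
      · exact ih h _

theorem contains_mergeStep_self (r : PySem.Dict Int (List Int)) (q : Int × List Int) :
    (mergeStep r q).contains q.1 = true := by
  unfold mergeStep
  split_ifs with h1
  · exact contains_foldl_mergeInner_mono q.1 q.2 q.1 r h1
  · exact PySem.Dict.contains_insert_self _ _ _

theorem mem_getD_mergeStep_self (r : PySem.Dict Int (List Int)) (q : Int × List Int) (s : Int)
    (hs : s ∈ q.2) : s ∈ (mergeStep r q).getD q.1 [] := by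
  unfold mergeStep
  split_ifs with h1
  · exact mem_getD_foldl_mergeInner_of_mem q.1 q.2 s hs r
  · rw [PySem.Dict.getD_insert_self]; exact hs

-- two overwriting inserts at distinct already-present keys commute (items-level)
theorem insert_insert_comm_of_contains (d : PySem.Dict Int (List Int)) (t k : Int)
    (w u : List Int) (hne : t ≠ k) (ht : d.contains t = true) (hk : d.contains k = true) :
    (d.insert t w).insert k u = (d.insert k u).insert t w := by
  have ht' : (d.insert k u).contains t = true := by simp [PySem.Dict.contains_insert, ht]
  have hk' : (d.insert t w).contains k = true := by simp [PySem.Dict.contains_insert, hk]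
  apply PySem.Dict.ext
  rw [PySem.Dict.items_insert_of_contains _ _ hk', PySem.Dict.items_insert_of_contains _ _ ht,
      PySem.Dict.items_insert_of_contains _ _ ht', PySem.Dict.items_insert_of_contains _ _ hk,
      List.map_map, List.map_map]
  apply List.map_congr_left
  intro p _
  by_cases h1 : p.1 = t <;> by_cases h2 : p.1 = k <;> simp [Function.comp, h1, h2, hne, Ne.symm hne]

-- one fresh insert and one overwriting insert at distinct keys commute
theorem insert_insert_comm_of_fresh (d : PySem.Dict Int (List Int)) (t k : Int)
    (w u : List Int) (hne : t ≠ k) (ht : d.contains t = true) (hk : d.contains k = false) :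
    (d.insert t w).insert k u = (d.insert k u).insert t w := by
  have ht' : (d.insert k u).contains t = true := by simp [PySem.Dict.contains_insert, ht]
  have hk' : (d.insert t w).contains k = false := by
    simp [PySem.Dict.contains_insert, hk, Ne.symm hne]
  apply PySem.Dict.ext
  rw [PySem.Dict.items_insert_of_not_contains _ _ hk', PySem.Dict.items_insert_of_contains _ _ ht,
      PySem.Dict.items_insert_of_contains _ _ ht', PySem.Dict.items_insert_of_not_contains _ _ hk,
      List.map_append]
  simp [Ne.symm hne]

theorem bInner_skip (r : PySem.Dict Int (List Int)) (s t : Int)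
    (ht : r.contains t = true) (hs : s ∈ r.getD t []) : bInner s r t = r := by
  unfold bInner; simp [ht, hs]

theorem bInner_ins (r : PySem.Dict Int (List Int)) (s t : Int)
    (ht : r.contains t = true) (hs : s ∉ r.getD t []) :
    bInner s r t = r.insert t (r.getD t [] ++ [s]) := by
  unfold bInner PySem.Dict.modify; simp [ht, hs]

theorem mergeInner_skip (k : Int) (r : PySem.Dict Int (List Int)) (x : Int)
    (hx : x ∈ r.getD k []) : mergeInner k r x = r := by
  unfold mergeInner; simp [hx]

theorem mergeInner_ins (k : Int) (r : PySem.Dict Int (List Int)) (x : Int)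
    (hx : x ∉ r.getD k []) : mergeInner k r x = r.insert k (r.getD k [] ++ [x]) := by
  unfold mergeInner PySem.Dict.modify; simp [hx]

-- bInner at a present key t commutes with mergeInner at another key k
theorem bInner_mergeInner_comm (r : PySem.Dict Int (List Int)) (s t k x : Int)
    (hne : t ≠ k) (ht : r.contains t = true) :
    bInner s (mergeInner k r x) t = mergeInner k (bInner s r t) x := by
  have h1 := contains_mergeInner_other k r x t hne
  have h2 := getD_mergeInner_other k r x t hne
  by_cases hs : s ∈ r.getD t []
  · rw [bInner_skip _ _ _ (h1.trans ht) (h2 ▸ hs), bInner_skip _ _ _ ht hs]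
  · rw [bInner_ins _ _ _ (h1.trans ht) (by rw [h2]; exact hs), h2,
        bInner_ins _ _ _ ht hs]
    by_cases hx : x ∈ r.getD k []
    · rw [mergeInner_skip _ _ _ hx,
        mergeInner_skip _ _ _ (by rwa [PySem.Dict.getD_insert_of_ne _ _ _ (Ne.symm hne)])]
    · rw [mergeInner_ins _ _ _ hx,
        mergeInner_ins _ _ _ (by rwa [PySem.Dict.getD_insert_of_ne _ _ _ (Ne.symm hne)]),
        PySem.Dict.getD_insert_of_ne _ _ _ (Ne.symm hne)]
      by_cases hk : r.contains k = true
      · exact (insert_insert_comm_of_contains r t k _ _ hne ht hk).symm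
      · exact (insert_insert_comm_of_fresh r t k _ _ hne ht (by simpa using hk)).symm

theorem bInner_foldl_mergeInner_comm (s t k : Int) (xs : List Int) (hne : t ≠ k) :
    ∀ (r : PySem.Dict Int (List Int)), r.contains t = true →
    bInner s (xs.foldl (mergeInner k) r) t = xs.foldl (mergeInner k) (bInner s r t) := by
  induction xs with
  | nil => intro r _; rfl
  | cons x xs ih =>
      intro r ht
      rw [List.foldl_cons, List.foldl_cons,
          ih _ ((contains_mergeInner_other k r x t hne).trans ht),
          bInner_mergeInner_comm r s t k x hne ht]

-- bInner at a present key t commutes with a whole mergeStep at another key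
theorem bInner_mergeStep_comm (r : PySem.Dict Int (List Int)) (s t : Int)
    (q : Int × List Int) (hne : t ≠ q.1) (ht : r.contains t = true) :
    bInner s (mergeStep r q) t = mergeStep (bInner s r t) q := by
  have hck : ∀ w, (r.insert t w).contains q.1 = r.contains q.1 := by
    intro w; simp [PySem.Dict.contains_insert, Ne.symm hne]
  by_cases hs : s ∈ r.getD t []
  · rw [bInner_skip _ _ _ ht hs,
        bInner_skip _ _ _ (contains_mergeStep_mono r q t ht)
          (by rw [getD_mergeStep_other r q t hne]; exact hs)]
  · rw [bInner_ins _ _ _ ht hs]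
    unfold mergeStep
    rw [hck]
    split_ifs with h1
    · rw [← bInner_ins _ _ _ ht hs, bInner_foldl_mergeInner_comm s t q.1 q.2 hne r ht,
          bInner_ins _ _ _ ht hs]
    · rw [bInner_ins _ _ _ (by simp [PySem.Dict.contains_insert, ht])
          (by rwa [PySem.Dict.getD_insert_of_ne _ _ _ hne]),
        PySem.Dict.getD_insert_of_ne _ _ _ hne]
      exact (insert_insert_comm_of_fresh r t q.1 _ _ hne ht (by simpa using h1)).symm

theorem bInner_foldl_mergeStep_comm (s t : Int) (suf : List (Int × List Int))
    (hsuf : ∀ q ∈ suf, q.1 ≠ t) :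
    ∀ (r : PySem.Dict Int (List Int)), r.contains t = true →
    suf.foldl mergeStep (bInner s r t) = bInner s (suf.foldl mergeStep r) t := by
  induction suf with
  | nil => intro r _; rfl
  | cons q suf ih =>
      intro r ht
      rw [List.foldl_cons, List.foldl_cons,
          ← bInner_mergeStep_comm r s t q (fun h => hsuf q (by simp) (h ▸ rfl)) ht]
      exact ih (fun q hq => hsuf q (List.mem_cons_of_mem _ hq)) _ (contains_mergeStep_mono r q t ht)

-- appending a fresh source at the end of a reverse-mapping entry = doing bInner after merging it
theorem mergeStep_append_singleton (r : PySem.Dict Int (List Int)) (t s : Int) (v : List Int)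
    (hs : s ∉ v) : mergeStep r (t, v ++ [s]) = bInner s (mergeStep r (t, v)) t := by
  by_cases h1 : r.contains t = true
  · have e1 : mergeStep r (t, v) = v.foldl (mergeInner t) r := by unfold mergeStep; simp [h1]
    have e2 : mergeStep r (t, v ++ [s]) = (v ++ [s]).foldl (mergeInner t) r := by
      unfold mergeStep; simp [h1]
    rw [e1, e2, List.foldl_append, List.foldl_cons, List.foldl_nil]
    have hc : (v.foldl (mergeInner t) r).contains t = true :=
      contains_foldl_mergeInner_mono t v t r h1
    by_cases hm : s ∈ (v.foldl (mergeInner t) r).getD t []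
    · rw [mergeInner_skip _ _ _ hm, bInner_skip _ _ _ hc hm]
    · rw [mergeInner_ins _ _ _ hm, bInner_ins _ _ _ hc hm]
  · have e1 : mergeStep r (t, v) = r.insert t v := by
      unfold mergeStep; simp [h1]
    have e2 : mergeStep r (t, v ++ [s]) = r.insert t (v ++ [s]) := by
      unfold mergeStep; simp [h1]
    rw [e1, e2, bInner_ins _ _ _ (PySem.Dict.contains_insert_self _ _ _)
        (by rw [PySem.Dict.getD_insert_self]; exact hs),
      PySem.Dict.getD_insert_self, PySem.Dict.insert_insert_self]

-- decompose a dict with nodup keys around a present key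
theorem dict_split (rm : PySem.Dict Int (List Int)) (t : Int)
    (hnd : (rm.keys).Nodup) (ht : rm.contains t = true) :
    ∃ pre v suf, rm.items = pre ++ (t, v) :: suf ∧
      (∀ q ∈ pre, q.1 ≠ t) ∧ (∀ q ∈ suf, q.1 ≠ t) ∧ rm.getD t [] = v := by
  have hmem : t ∈ rm.keys := (PySem.Dict.contains_iff_mem_keys rm t).mp ht
  have hkeys : rm.keys = rm.items.map Prod.fst := by
    simp [PySem.Dict.keys]
  rw [hkeys] at hmem hnd
  obtain ⟨p, hp, hpt⟩ := List.exists_of_mem_map hmem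
  obtain ⟨pre, suf, hsplit⟩ := List.append_of_mem hp
  refine ⟨pre, p.2, suf, by rw [hsplit, ← hpt], ?_, ?_, ?_⟩
  · intro q hq he
    rw [hsplit, List.map_append, List.map_cons] at hnd
    have h3 := (List.nodup_append.mp hnd).2.2
    exact h3 q.1 (List.mem_map_of_mem hq) p.1 (List.mem_cons_self) (by rw [he, hpt])
  · intro q hq he
    rw [hsplit, List.map_append, List.map_cons] at hnd
    have h3 := List.nodup_cons.mp (List.nodup_append.mp hnd).2.1
    exact h3.1 (by rw [hpt, ← he]; exact List.mem_map_of_mem hq)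
  · have : (t, p.2) ∈ rm.items := by rw [hsplit, ← hpt]; simp
    exact PySem.Dict.getD_of_mem_items rm this (by rw [hkeys]; exact hnd) []

theorem contains_foldl_mergeStep_mono (t : Int) (l : List (Int × List Int)) :
    ∀ (r : PySem.Dict Int (List Int)), r.contains t = true →
      (l.foldl mergeStep r).contains t = true := by
  induction l with
  | nil => intro r h; exact h
  | cons q l ih => intro r h; exact ih _ (contains_mergeStep_mono r q t h)

theorem getD_foldl_mergeStep_other (t : Int) (l : List (Int × List Int))
    (hl : ∀ q ∈ l, q.1 ≠ t) :
    ∀ (r : PySem.Dict Int (List Int)), (l.foldl mergeStep r).getD t [] = r.getD t [] := by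
  induction l with
  | nil => intro r; rfl
  | cons q l ih =>
      intro r
      rw [List.foldl_cons, ih (fun q hq => hl q (List.mem_cons_of_mem _ hq)),
          getD_mergeStep_other r q t (fun h => hl q List.mem_cons_self (h ▸ rfl))]

theorem rmInner_not_contains (rm : PySem.Dict Int (List Int)) (s t : Int)
    (h : rm.contains t = false) : rmInner s rm t = rm.insert t [s] := by
  unfold rmInner PySem.Dict.modify
  simp [h, PySem.Dict.getD_insert_self, PySem.Dict.insert_insert_self]

theorem rmInner_skip (rm : PySem.Dict Int (List Int)) (s t : Int)
    (h : rm.contains t = true) (hs : s ∈ rm.getD t []) : rmInner s rm t = rm := by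
  unfold rmInner; simp [h, hs]

theorem rmInner_ins (rm : PySem.Dict Int (List Int)) (s t : Int)
    (h : rm.contains t = true) (hs : s ∉ rm.getD t []) :
    rmInner s rm t = rm.insert t (rm.getD t [] ++ [s]) := by
  unfold rmInner PySem.Dict.modify; simp [h, hs]

theorem nodup_keys_rmInner (rm : PySem.Dict Int (List Int)) (s t : Int)
    (hnd : (rm.keys).Nodup) : ((rmInner s rm t).keys).Nodup := by
  by_cases h : rm.contains t = true
  · by_cases hs : s ∈ rm.getD t []
    · rw [rmInner_skip rm s t h hs]; exact hnd
    · rw [rmInner_ins rm s t h hs]; exact PySem.Dict.nodup_keys_insert _ _ _ hnd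
  · rw [rmInner_not_contains rm s t (by simpa using h)]
    exact PySem.Dict.nodup_keys_insert _ _ _ hnd

-- replacing the value at the only entry with key t, at items level
theorem items_insert_split (rm : PySem.Dict Int (List Int)) (t : Int) (w : List Int)
    (pre suf : List (Int × List Int)) (v : List Int)
    (ht : rm.contains t = true)
    (hsplit : rm.items = pre ++ (t, v) :: suf)
    (hpre : ∀ q ∈ pre, q.1 ≠ t) (hsuf : ∀ q ∈ suf, q.1 ≠ t) :
    (rm.insert t w).items = pre ++ (t, w) :: suf := by
  rw [PySem.Dict.items_insert_of_contains _ _ ht, hsplit, List.map_append, List.map_cons]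
  congr 1
  · apply (List.map_congr_left _).trans (List.map_id _)
    intro q hq
    simp [hpre q hq]
  · congr 1
    · simp
    · apply (List.map_congr_left _).trans (List.map_id _)
      intro q hq
      simp [hsuf q hq]

theorem merge_rmInner (res rm : PySem.Dict Int (List Int)) (s t : Int)
    (hnd : (rm.keys).Nodup) :
    ((rmInner s rm t).items.foldl mergeStep res) =
      bInner s (rm.items.foldl mergeStep res) t := by
  by_cases h : rm.contains t = true
  · obtain ⟨pre, v, suf, hsplit, hpre, hsuf, hget⟩ := dict_split rm t hnd h
    by_cases hs : s ∈ rm.getD t []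
    · rw [rmInner_skip rm s t h hs, hsplit, List.foldl_append, List.foldl_cons]
      rw [bInner_skip _ _ _
        (contains_foldl_mergeStep_mono t suf _ (contains_mergeStep_self _ _))
        (by rw [getD_foldl_mergeStep_other t suf hsuf]
            exact mem_getD_mergeStep_self _ (t, v) s (hget ▸ hs))]
    · rw [rmInner_ins rm s t h hs,
          items_insert_split rm t _ pre suf v h hsplit hpre hsuf, hget,
          List.foldl_append, List.foldl_cons,
          mergeStep_append_singleton _ t s v (hget ▸ hs),
          bInner_foldl_mergeStep_comm s t suf hsuf _ (contains_mergeStep_self _ _),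
          hsplit, List.foldl_append, List.foldl_cons]
  · rw [rmInner_not_contains rm s t (by simpa using h)]
    have : (rm.insert t [s]).items = rm.items ++ [(t, [s])] :=
      PySem.Dict.items_insert_of_not_contains _ _ (by simpa using h)
    rw [this, List.foldl_append, List.foldl_cons, List.foldl_nil, mergeStep_singleton]

-- PERSOURCE: merging after a whole rmStep = bStep after merging
theorem merge_rmStep (res : PySem.Dict Int (List Int)) (s : Int) (ts : List Int) :
    ∀ (rm : PySem.Dict Int (List Int)), (rm.keys).Nodup →
    ((ts.foldl (rmInner s) rm).items.foldl mergeStep res) =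
      ts.foldl (bInner s) (rm.items.foldl mergeStep res) := by
  induction ts with
  | nil => intro rm _; rfl
  | cons t ts ih =>
      intro rm hnd
      simp only [List.foldl]
      rw [ih _ (nodup_keys_rmInner rm s t hnd), merge_rmInner res rm s t hnd]

theorem nodup_keys_rmStep (rm : PySem.Dict Int (List Int)) (p : Int × List Int)
    (hnd : (rm.keys).Nodup) : ((rmStep rm p).keys).Nodup := by
  unfold rmStep
  induction p.2 generalizing rm with
  | nil => exact hnd
  | cons t ts ih => exact ih _ (nodup_keys_rmInner rm p.1 t hnd)

-- MAIN: A's build-reverse-index-then-merge over a list of items = B's single pass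
theorem merge_rm_main (res : PySem.Dict Int (List Int)) (items : List (Int × List Int)) :
    ∀ (rm : PySem.Dict Int (List Int)), (rm.keys).Nodup →
    ((items.foldl rmStep rm).items.foldl mergeStep res) =
      items.foldl bStep (rm.items.foldl mergeStep res) := by
  induction items with
  | nil => intro rm _; rfl
  | cons p items ih =>
      intro rm hnd
      simp only [List.foldl]
      rw [ih _ (nodup_keys_rmStep rm p hnd)]
      congr 1
      exact merge_rmStep res p.1 p.2 rm hnd

-- ===== VERDICT (by name: the statement is the Claim_ definition above) =====
theorem makeBidirectional_spec : Claim_equal_makeBidirectional := by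
  intro restrictions _
  unfold Spec_makeBidirectional makeBidirectional makeBidirectional_alt
  have h := merge_rm_main (pass1 restrictions) (pass1 restrictions).items
      PySem.Dict.empty (by simp)
  exact congrArg PySem.Dict.items h
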